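-- pv_equiv track=rewrite | github.com/Schakirov/pubmed | analyze.py | process
-- ===== SOURCE A (Python) =====
-- def process(t, d, final=True): #(text, dictionary, colorFunc):
--     if_good = sum([d[keyword] for keyword in d.keys() if keyword in t])
--     if not final:
--         return [], if_good
--     else:
--         iArr = []
--         for keyword in d.keys():
--             if keyword in t:
--                 i1 = t.find(keyword)
--                 i2 = i1 + len(keyword)
--                 iArr.append([i1, 1]); iArr.append([i2, 2]);
--         #t_ans = insert_font_tags(t, iArr, font_color)
--         return iArr, if_good
-- ===== SOURCE B (Python) =====
-- def process(t, d, final=True):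
--     # One left-to-right sweep over text positions: at each position, record it for
--     # every still-unfound keyword that starts there; stop once all keywords are found.
--     # Then rebuild the sum and the marker array in dictionary-key order.
--     pending = list(d.keys())
--     pos = {}
--     for i in range(len(t) + 1):
--         if not pending:
--             break
--         still = []
--         for k in pending:
--             if t.startswith(k, i):
--                 pos[k] = i
--             else:
--                 still.append(k)
--         pending = still
--     if_good = sum(d[k] for k in d.keys() if k in pos)
--     if not final:
--         return [], if_good
--     iArr = []
--     for k in d.keys():
--         if k in pos:
--             iArr.append([pos[k], 1])
--             iArr.append([pos[k] + len(k), 2])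
--     return iArr, if_good
-- ===== Notes on version B (the rewrite author's own statement) =====
-- stated objective: alternative
-- what changed: A runs a separate substring search per keyword (membership test in the sum, then membership plus find again in the output loop); B makes one left-to-right sweep over text positions, recording the first hit of each still-pending keyword and stopping early once all are found, then rebuilds the sum and marker array in key order from that position map.
import Mathlib
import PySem

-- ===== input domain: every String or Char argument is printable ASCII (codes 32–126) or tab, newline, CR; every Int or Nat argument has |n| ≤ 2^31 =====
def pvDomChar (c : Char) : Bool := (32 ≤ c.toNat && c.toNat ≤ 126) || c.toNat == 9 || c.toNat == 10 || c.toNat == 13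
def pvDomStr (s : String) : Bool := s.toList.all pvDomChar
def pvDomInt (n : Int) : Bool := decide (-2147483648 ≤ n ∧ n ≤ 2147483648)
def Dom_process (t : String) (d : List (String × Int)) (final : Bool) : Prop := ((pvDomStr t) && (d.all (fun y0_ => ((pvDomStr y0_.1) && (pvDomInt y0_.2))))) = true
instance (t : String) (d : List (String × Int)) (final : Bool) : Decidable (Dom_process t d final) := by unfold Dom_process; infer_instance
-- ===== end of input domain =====

-- B replaces A's per-keyword substring searches (`in` twice plus `find`) by ONE left-to-right
-- sweep over text positions that records the first hit of every still-unfound keyword and stops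
-- early once all are found; output is rebuilt in key order. Alternative algorithm, same results.

-- ===== PORT A =====
-- d[keyword] for keyword ∈ d.keys() can never raise KeyError, so getD _ 0 is exact here.
def process (t : String) (d : List (String × Int)) (final : Bool) : List (List Int) × Int :=
  let dd := PySem.Dict.ofList d
  let if_good := ((dd.keys.filter (fun k => PySem.Str.isIn k t)).map (fun k => dd.getD k 0)).sum
  if !final then ([], if_good)
  else
    let iArr := dd.keys.foldl (fun acc k =>
      if PySem.Str.isIn k t then
        let i1 := PySem.Str.find t k
        let i2 := i1 + PySem.Str.len k
        acc ++ [[i1, 1], [i2, 2]]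
      else acc) []
    (iArr, if_good)

-- ===== PORT B =====
-- One position i: move every pending keyword either into pos (it starts at i) or into the
-- new pending list.  t.startswith(k, i) with 0 ≤ i ≤ len(t) is exactly k <+: t.drop i.
def scanStep (t : List Char) (i : Nat) (pending : List String)
    (pos : PySem.Dict String Int) : PySem.Dict String Int × List String :=
  pending.foldl (fun pr k =>
    if PySem.Chars.startswith (List.drop i t) k.toList then (pr.1.insert k (i : Int), pr.2)
    else (pr.1, pr.2 ++ [k])) (pos, [])

-- for i in range(len(t)+1): with early break when pending is empty; n is the remaining range length.
def scanLoop (t : List Char) (i : Nat) (n : Nat) (pending : List String)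
    (pos : PySem.Dict String Int) : PySem.Dict String Int :=
  match n with
  | 0 => pos
  | n + 1 =>
    if pending = [] then pos
    else
      let r := scanStep t i pending pos
      scanLoop t (i + 1) n r.2 r.1

def process_alt (t : String) (d : List (String × Int)) (final : Bool) : List (List Int) × Int :=
  let dd := PySem.Dict.ofList d
  let pos := scanLoop t.toList 0 (t.toList.length + 1) dd.keys PySem.Dict.empty
  let if_good := ((dd.keys.filter (fun k => pos.contains k)).map (fun k => dd.getD k 0)).sum
  if !final then ([], if_good)
  else
    let iArr := dd.keys.foldl (fun acc k =>
      match pos.get? k with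
      | some p => acc ++ [[p, 1], [p + PySem.Str.len k, 2]]
      | none => acc) []
    (iArr, if_good)

-- ===== PRECONDITION & SPEC =====
def Spec_process (t : String) (d : List (String × Int)) (final : Bool) (out : List (List Int) × Int) : Prop := out = process_alt t d final
instance (t : String) (d : List (String × Int)) (final : Bool) (out : List (List Int) × Int) : Decidable (Spec_process t d final out) := by unfold Spec_process; infer_instance

-- ===== CLAIM (what is proved, stated in full; the proofs are below) =====
def Claim_equal_process : Prop := ∀ (t : String) (d : List (String × Int)) (final : Bool), Dom_process t d final → Spec_process t d final (process t d final)

-- ===== LEMMAS AND PROOFS =====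

-- first j in [i, i+n) with k <+: t.drop j, proof-side mirror of the sweep
def firstMatch (t k : List Char) (i n : Nat) : Option Nat :=
  match n with
  | 0 => none
  | n + 1 => if k <+: List.drop i t then some i else firstMatch t k (i + 1) n

lemma scanStep_aux_snd (t : List Char) (i : Nat) (pending : List String) :
    ∀ (pos : PySem.Dict String Int) (acc : List String),
    (pending.foldl (fun pr k =>
        if PySem.Chars.startswith (List.drop i t) k.toList then (pr.1.insert k (i : Int), pr.2)
        else (pr.1, pr.2 ++ [k])) (pos, acc)).2
      = acc ++ pending.filter (fun k => !PySem.Chars.startswith (List.drop i t) k.toList) := by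
  induction pending with
  | nil => simp
  | cons p ps ih =>
    intro pos acc
    simp only [List.foldl_cons, List.filter_cons]
    by_cases hp : PySem.Chars.startswith (List.drop i t) p.toList = true
    · simp [hp, ih]
    · simp only [Bool.not_eq_true] at hp
      simp [hp, ih, List.append_assoc]

lemma scanStep_snd (t : List Char) (i : Nat) (pending : List String)
    (pos : PySem.Dict String Int) :
    (scanStep t i pending pos).2
      = pending.filter (fun k => !PySem.Chars.startswith (List.drop i t) k.toList) := by
  simpa using scanStep_aux_snd t i pending pos []

lemma scanStep_aux_fst (t : List Char) (i : Nat) (pending : List String) :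
    ∀ (pos : PySem.Dict String Int) (acc : List String), pending.Nodup → ∀ (k : String),
    (pending.foldl (fun pr k =>
        if PySem.Chars.startswith (List.drop i t) k.toList then (pr.1.insert k (i : Int), pr.2)
        else (pr.1, pr.2 ++ [k])) (pos, acc)).1.get? k
      = if k ∈ pending ∧ PySem.Chars.startswith (List.drop i t) k.toList = true then some (i : Int)
        else pos.get? k := by
  induction pending with
  | nil => simp
  | cons p ps ih =>
    intro pos acc hnd k
    obtain ⟨hpn, hnd'⟩ := List.nodup_cons.mp hnd
    simp only [List.foldl_cons]
    by_cases hp : PySem.Chars.startswith (List.drop i t) p.toList = true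
    · simp only [hp, if_true]
      rw [ih _ _ hnd' k]
      by_cases hkps : k ∈ ps
      · have hkp : k ≠ p := fun h => hpn (h ▸ hkps)
        by_cases hks : PySem.Chars.startswith (List.drop i t) k.toList = true
        · simp [hkps, hks]
        · simp [hkps, hks, PySem.Dict.get?_insert_of_ne _ _ hkp, hkp]
      · by_cases hkp : k = p
        · subst hkp
          simp [hkps, hp, PySem.Dict.get?_insert_self]
        · simp [hkps, hkp, PySem.Dict.get?_insert_of_ne _ _ hkp]
    · rw [if_neg (by simp [hp])]
      rw [ih _ _ hnd' k]
      by_cases hkp : k = p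
      · subst hkp
        simp [hpn, hp]
      · simp [hkp]

lemma scanStep_fst_get? (t : List Char) (i : Nat) (pending : List String)
    (pos : PySem.Dict String Int) (hnd : pending.Nodup) (k : String) :
    (scanStep t i pending pos).1.get? k
      = if k ∈ pending ∧ PySem.Chars.startswith (List.drop i t) k.toList = true then some (i : Int)
        else pos.get? k := by
  exact scanStep_aux_fst t i pending pos [] hnd k

lemma scanLoop_get? (t : List Char) (n i : Nat) (pending : List String)
    (pos : PySem.Dict String Int) (hnd : pending.Nodup) (k : String) :
    (scanLoop t i n pending pos).get? k
      = if k ∈ pending then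
          (match firstMatch t k.toList i n with
           | some j => some (j : Int)
           | none => pos.get? k)
        else pos.get? k := by
  induction n generalizing i pending pos with
  | zero =>
    by_cases hk : k ∈ pending <;> simp [scanLoop, firstMatch, hk]
  | succ n ih =>
    simp only [scanLoop]
    by_cases hemp : pending = []
    · subst hemp; simp
    · rw [if_neg hemp]
      have hnd2 : ((scanStep t i pending pos).2).Nodup := by
        rw [scanStep_snd]; exact hnd.filter _
      rw [ih (i + 1) _ _ hnd2, scanStep_snd]
      by_cases hk : k ∈ pending
      · by_cases hsw : PySem.Chars.startswith (List.drop i t) k.toList = true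
        · have hnot : k ∉ pending.filter
              (fun k => !PySem.Chars.startswith (List.drop i t) k.toList) := by
            simp [List.mem_filter, hsw]
          rw [if_neg hnot, scanStep_fst_get? _ _ _ _ hnd, if_pos ⟨hk, hsw⟩]
          have hpre : k.toList <+: List.drop i t := (PySem.Chars.startswith_iff _ _).mp hsw
          simp [hk, firstMatch, hpre]
        · have hin : k ∈ pending.filter
              (fun k => !PySem.Chars.startswith (List.drop i t) k.toList) := by
            simp [List.mem_filter, hk, hsw]
          rw [if_pos hin, scanStep_fst_get? _ _ _ _ hnd,
            if_neg (by simp [hsw]), if_pos hk]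
          have hnp : ¬ k.toList <+: List.drop i t :=
            fun h => hsw ((PySem.Chars.startswith_iff _ _).mpr h)
          simp [firstMatch, hnp]
      · have hnot : k ∉ pending.filter
            (fun k => !PySem.Chars.startswith (List.drop i t) k.toList) :=
          fun h => hk (List.mem_of_mem_filter h)
        rw [if_neg hnot, scanStep_fst_get? _ _ _ _ hnd,
          if_neg (by simp [hk]), if_neg hk]

lemma firstMatch_eq_some_of (t k : List Char) (i n m : Nat) (h1 : i ≤ m) (h2 : m < i + n)
    (hp : k <+: List.drop m t) (hmin : ∀ j, j < m → ¬ k <+: List.drop j t) :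
    firstMatch t k i n = some m := by
  induction n generalizing i with
  | zero => omega
  | succ n ih =>
    unfold firstMatch
    by_cases hpi : k <+: List.drop i t
    · have him : i = m := by
        rcases Nat.lt_or_ge i m with h | h
        · exact absurd hpi (hmin i h)
        · omega
      subst him; rw [if_pos hpi]
    · have hmi : i ≠ m := fun h => hpi (h ▸ hp)
      rw [if_neg hpi]
      exact ih (i + 1) (by omega) (by omega)

lemma firstMatch_eq_none_of (t k : List Char) (i n : Nat)
    (h : ∀ j, ¬ k <+: List.drop j t) : firstMatch t k i n = none := by
  induction n generalizing i with
  | zero => rfl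
  | succ n ih => simp [firstMatch, h i, ih]

lemma firstMatch_eq_find (t k : List Char) :
    firstMatch t k 0 (t.length + 1)
      = if PySem.Chars.isIn k t then some (PySem.Chars.find t k).toNat else none := by
  by_cases hin : PySem.Chars.isIn k t = true
  · rw [if_pos hin]
    have hinf : k <:+: t := (PySem.Chars.isIn_iff_infix k t).mp hin
    have hnn : 0 ≤ PySem.Chars.find t k := (PySem.Chars.find_nonneg_iff t k).mpr hinf
    obtain ⟨hpre, hmin⟩ := PySem.Chars.find_spec hnn
    refine firstMatch_eq_some_of t k 0 (t.length + 1) _ (Nat.zero_le _) ?_ hpre hmin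
    have hle : PySem.Chars.find t k ≤ (t.length : Int) := PySem.Chars.find_le_length t k
    omega
  · rw [if_neg hin]
    refine firstMatch_eq_none_of t k 0 _ (fun j hj => ?_)
    exact hin ((PySem.Chars.exists_prefix_drop_iff_isIn k t).mp ⟨j, hj⟩)

-- the characterisation of B's pos map on the dictionary keys
lemma pos_get? (t : String) (d : List (String × Int)) (k : String)
    (hk : k ∈ (PySem.Dict.ofList d).keys) :
    (scanLoop t.toList 0 (t.toList.length + 1) (PySem.Dict.ofList d).keys PySem.Dict.empty).get? k
      = if PySem.Str.isIn k t then some (PySem.Str.find t k) else none := by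
  rw [scanLoop_get? t.toList _ 0 _ _ (PySem.Dict.nodup_keys_ofList d) k, if_pos hk,
    firstMatch_eq_find]
  by_cases hin : PySem.Chars.isIn k.toList t.toList = true
  · have h2 : PySem.Str.isIn k t = true := by rw [PySem.Str.isIn_eq]; exact hin
    rw [if_pos hin, if_pos h2]
    have hnn : 0 ≤ PySem.Chars.find t.toList k.toList :=
      (PySem.Chars.find_nonneg_iff _ _).mpr ((PySem.Chars.isIn_iff_infix _ _).mp hin)
    simp [PySem.Str.find_eq, Int.toNat_of_nonneg hnn]
  · have h2 : ¬ PySem.Str.isIn k t = true := by rw [PySem.Str.isIn_eq]; exact hin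
    rw [if_neg hin, if_neg h2]
    simp

-- ===== VERDICT (by name: the statement is the Claim_ definition above) =====
theorem process_spec : Claim_equal_process := by
  intro t d final _
  unfold Spec_process process process_alt
  have hfil : (PySem.Dict.ofList d).keys.filter (fun k => PySem.Str.isIn k t)
      = (PySem.Dict.ofList d).keys.filter (fun k =>
          (scanLoop t.toList 0 (t.toList.length + 1) (PySem.Dict.ofList d).keys
            PySem.Dict.empty).contains k) := by
    refine List.filter_congr (fun k hk => ?_)
    rw [PySem.Dict.contains_eq_isSome_get?, pos_get? t d k hk]
    by_cases h : PySem.Chars.isIn k.toList t.toList = true <;>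
      simp [PySem.Str.isIn_eq, h]
  have harr : (PySem.Dict.ofList d).keys.foldl (fun acc k =>
        if PySem.Str.isIn k t then
          let i1 := PySem.Str.find t k
          let i2 := i1 + PySem.Str.len k
          acc ++ [[i1, 1], [i2, 2]]
        else acc) []
      = (PySem.Dict.ofList d).keys.foldl (fun acc k =>
          match (scanLoop t.toList 0 (t.toList.length + 1) (PySem.Dict.ofList d).keys
              PySem.Dict.empty).get? k with
          | some p => acc ++ [[p, 1], [p + PySem.Str.len k, 2]]
          | none => acc) [] := by
    refine PySem.List.foldl_congr_mem _ _ _ _ (fun acc k hk => ?_)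
    rw [pos_get? t d k hk]
    by_cases h : PySem.Chars.isIn k.toList t.toList = true <;>
      simp [PySem.Str.isIn_eq, h]
  cases final
  · simp only [Bool.not_false, reduceIte]
    rw [hfil]
  · simp only [Bool.not_true]
    rw [hfil, harr]
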